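-- pv_equiv track=rewrite | github.com/Norbiros/AoC2023 | day_12/main.py | count_hashes_between_dots
-- ===== SOURCE A (Python) =====
-- def count_hashes_between_dots(input_str):
--     counts = []
--
--     # Find indices of '.' or '?' in the pattern
--     dot_indices = [i for i, char in enumerate(input_str) if char in ('.', '?')]
--
--     # Iterate through each pair of '.' or '?' and count '#' in between
--     for i in range(1, len(dot_indices)):
--         start = dot_indices[i - 1]
--         end = dot_indices[i]
--         count = input_str[start + 1:end].count('#')
--         counts.append(count)
--
--     return list(filter(lambda x: x != 0, counts))
-- ===== SOURCE B (Python) =====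
-- def count_hashes_between_dots(input_str):
--     results = []
--     run = 0
--     seen_delim = False
--     for ch in input_str:
--         if ch in ('.', '?'):
--             if seen_delim and run != 0:
--                 results.append(run)
--             run = 0
--             seen_delim = True
--         elif ch == '#':
--             run += 1
--     return results
-- ===== Notes on version B (the rewrite author's own statement) =====
-- stated objective: simpler
-- what changed: Replaces the delimiter-index list plus per-pair slicing/counting (which rescans the string for each adjacent delimiter pair) with a single left-to-right scan maintaining a running hash count and a seen-delimiter flag, appending nonzero runs directly.
import Mathlib
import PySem

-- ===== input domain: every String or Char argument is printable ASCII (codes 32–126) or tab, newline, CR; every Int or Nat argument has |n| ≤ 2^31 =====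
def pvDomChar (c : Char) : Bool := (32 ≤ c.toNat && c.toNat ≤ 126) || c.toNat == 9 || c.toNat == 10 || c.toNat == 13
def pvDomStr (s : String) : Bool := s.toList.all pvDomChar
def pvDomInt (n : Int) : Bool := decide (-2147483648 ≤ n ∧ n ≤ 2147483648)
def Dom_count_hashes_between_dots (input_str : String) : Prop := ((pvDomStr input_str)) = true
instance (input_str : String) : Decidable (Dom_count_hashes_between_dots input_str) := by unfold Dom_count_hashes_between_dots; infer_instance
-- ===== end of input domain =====

-- B replaces the per-delimiter-pair slicing/counting with one linear scan carrying a running hash count and a seen-delimiter flag.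

-- ===== PORT A =====
def count_hashes_between_dots (input_str : String) : List Int :=
  let chars := input_str.toList
  -- dot_indices = [i for i, char in enumerate(input_str) if char in ('.', '?')]
  let dot_indices : List Int :=
    ((PySem.List.enumerate chars 0).filter (fun p => p.2 == '.' || p.2 == '?')).map (·.1)
  -- for i in range(1, len(dot_indices)): counts.append(input_str[start+1:end].count('#'))
  let counts : List Int :=
    (PySem.List.pyRange 1 (dot_indices.length : Int) 1).foldl (fun acc i =>
      let start := PySem.List.pyGetD dot_indices (i - 1) 0
      let stop := PySem.List.pyGetD dot_indices i 0
      acc ++ [(PySem.List.count (PySem.List.slice chars (some (start + 1)) (some stop)) '#' : Int)]) []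
  counts.filter (fun x => x ≠ 0)

-- ===== PORT B =====
def count_hashes_between_dots_alt (input_str : String) : List Int :=
  let st := input_str.toList.foldl
    (fun (st : List Int × Int × Bool) ch =>
      let (results, run, seen_delim) := st
      if ch = '.' ∨ ch = '?' then
        ((if seen_delim ∧ run ≠ 0 then results ++ [run] else results), 0, true)
      else if ch = '#' then
        (results, run + 1, seen_delim)
      else
        (results, run, seen_delim))
    ([], 0, false)
  st.1

-- ===== PRECONDITION & SPEC =====
def Spec_count_hashes_between_dots (input_str : String) (out : List Int) : Prop := out = count_hashes_between_dots_alt input_str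
instance (input_str : String) (out : List Int) : Decidable (Spec_count_hashes_between_dots input_str out) := by unfold Spec_count_hashes_between_dots; infer_instance

-- ===== CLAIM (what is proved, stated in full; the proofs are below) =====
def Claim_equal_count_hashes_between_dots : Prop := ∀ (input_str : String), Dom_count_hashes_between_dots input_str → Spec_count_hashes_between_dots input_str (count_hashes_between_dots input_str)

-- ===== LEMMAS AND PROOFS =====

def pvDs (l : List Char) : List Int :=
  ((PySem.List.enumerate l 0).filter (fun p => p.2 == '.' || p.2 == '?')).map (·.1)

lemma pvDs_mem (l : List Char) {a : Int} (h : a ∈ pvDs l) :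
    ∃ k : Nat, a = (k : Int) ∧ k < l.length := by
  simp only [pvDs, List.mem_map, List.mem_filter] at h
  obtain ⟨p, ⟨hp, _⟩, rfl⟩ := h
  rw [PySem.List.mem_enumerate_iff] at hp
  obtain ⟨k, hk, rfl⟩ := hp
  exact ⟨k, by simp, hk⟩

lemma pvDs_append (l : List Char) (c : Char) :
    pvDs (l ++ [c]) = pvDs l ++ (if c = '.' ∨ c = '?' then [(l.length : Int)] else []) := by
  unfold pvDs
  rw [PySem.List.enumerate_append]
  by_cases h : c = '.' ∨ c = '?' <;>
    simp [List.filter_append, PySem.List.enumerate, h]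

lemma pvZip_tail_append {α : Type} (xs : List α) (y : α) (h : xs ≠ []) :
    (xs ++ [y]).zip (xs ++ [y]).tail = xs.zip xs.tail ++ [(xs.getLast h, y)] := by
  induction xs with
  | nil => exact absurd rfl h
  | cons x t ih =>
    cases t with
    | nil => simp
    | cons a t2 =>
      simp only [List.cons_append, List.zip_cons_cons, List.tail_cons] at *
      rw [ih (by simp)]
      simp [List.getLast]

def pvCnt (l : List Char) (a b : Int) : Int :=
  (PySem.List.count (PySem.List.slice l (some (a + 1)) (some b)) '#' : Int)

lemma pvCnt_append (l : List Char) (c : Char) {a b : Int} {ka kb : Nat}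
    (ha : a = (ka : Int)) (hb : b = (kb : Int)) (hkb : kb ≤ l.length) :
    pvCnt (l ++ [c]) a b = pvCnt l a b := by
  subst ha hb
  unfold pvCnt
  have h1 : ((ka : Int) + 1) = ((ka + 1 : Nat) : Int) := by omega
  rw [h1, PySem.List.slice_natCast, PySem.List.slice_natCast]
  rcases Nat.lt_or_ge kb (ka + 1) with hlt | hle
  · have : kb - (ka + 1) = 0 := by omega
    simp [this]
  · rw [List.drop_append_of_le_length (by omega), List.take_append_of_le_length (by simp; omega)]

lemma pvCnt_append_last (l : List Char) (c : Char) {ka : Nat} (hka : ka < l.length) :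
    pvCnt (l ++ [c]) (ka : Int) (((l ++ [c]).length : Nat) : Int) =
      pvCnt l (ka : Int) ((l.length : Nat) : Int) + (if c = '#' then 1 else 0) := by
  unfold pvCnt
  have h1 : ((ka : Int) + 1) = ((ka + 1 : Nat) : Int) := by omega
  rw [h1, PySem.List.slice_natCast, PySem.List.slice_natCast]
  rw [List.drop_append_of_le_length (by omega)]
  have h2 : (l ++ [c]).length = l.length + 1 := by simp
  rw [h2]
  rw [List.take_of_length_le (by simp; omega), List.take_of_length_le (by simp)]
  rw [PySem.List.count_eq, PySem.List.count_eq, List.count_append]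
  by_cases hc : c = '#' <;> simp [hc]

lemma pvAdj {β : Type} (xs : List Int) (g : Int → Int → β) :
    (PySem.List.pyRange 1 (xs.length : Int)).map
        (fun i => g (PySem.List.pyGetD xs (i - 1) 0) (PySem.List.pyGetD xs i 0)) =
      (xs.zip xs.tail).map (fun p => g p.1 p.2) := by
  rw [PySem.List.pyRange_of_pos 1 (xs.length : Int) Int.one_pos]
  have ht : (if (1:Int) < (xs.length:Int) then (((xs.length:Int) - 1 + 1 - 1)/1).toNat else 0)
      = xs.length - 1 := by split <;> omega
  rw [ht, List.map_map]
  apply List.ext_getElem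
  · simp
  · intro k h1 h2
    simp only [List.getElem_map, Function.comp, List.getElem_range, List.getElem_zip]
    have e1 : (1 + 1 * (k : Int)) - 1 = ((k : Nat) : Int) := by omega
    have e2 : (1 + 1 * (k : Int)) = (((k + 1 : Nat)) : Int) := by omega
    rw [e1, e2, PySem.List.pyGetD_natCast, PySem.List.pyGetD_natCast]
    simp at h1
    rw [List.getD_eq_getElem xs 0 (by omega), List.getD_eq_getElem xs 0 (by omega)]
    congr 1
    rw [List.getElem_tail]

def pvA (l : List Char) : List Int :=
  (((pvDs l).zip (pvDs l).tail).map (fun p => pvCnt l p.1 p.2)).filter (fun x => x ≠ 0)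

lemma pvA_eq (l : List Char) :
    (((PySem.List.pyRange 1 ((pvDs l).length : Int) 1).foldl (fun acc i =>
      let start := PySem.List.pyGetD (pvDs l) (i - 1) 0
      let stop := PySem.List.pyGetD (pvDs l) i 0
      acc ++ [(PySem.List.count (PySem.List.slice l (some (start + 1)) (some stop)) '#' : Int)]) []).filter
        (fun x => x ≠ 0)) = pvA l := by
  unfold pvA
  have h := PySem.List.foldl_append_singleton_eq_map
    (fun i => pvCnt l (PySem.List.pyGetD (pvDs l) (i - 1) 0) (PySem.List.pyGetD (pvDs l) i 0))
    (PySem.List.pyRange 1 ((pvDs l).length : Int) 1) []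
  rw [List.nil_append] at h
  exact congrArg (fun t => t.filter (fun x => decide (x ≠ 0)))
    (h.trans (pvAdj (pvDs l) (fun a b => pvCnt l a b)))

lemma pvA_append_keep (l : List Char) (c : Char) (hc : ¬(c = '.' ∨ c = '?')) :
    pvA (l ++ [c]) = pvA l := by
  unfold pvA
  rw [pvDs_append, if_neg hc, List.append_nil]
  congr 1
  apply List.map_congr_left
  intro p hp
  obtain ⟨hp1, hp2⟩ := List.of_mem_zip hp
  obtain ⟨ka, ha, hka⟩ := pvDs_mem l hp1
  obtain ⟨kb, hb, hkb⟩ := pvDs_mem l (List.mem_of_mem_tail hp2)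
  exact pvCnt_append l c ha hb hkb.le

lemma pvA_append_delim (l : List Char) (c : Char) (hc : c = '.' ∨ c = '?') (hnil : pvDs l ≠ []) :
    pvA (l ++ [c]) = pvA l ++
      (List.filter (fun x => decide (x ≠ 0)) [pvCnt l ((pvDs l).getLast hnil) (l.length : Int)]) := by
  unfold pvA
  rw [pvDs_append, if_pos hc, pvZip_tail_append _ _ hnil, List.map_append, List.filter_append]
  congr 1
  · congr 1
    apply List.map_congr_left
    intro p hp
    obtain ⟨hp1, hp2⟩ := List.of_mem_zip hp
    obtain ⟨ka, ha, hka⟩ := pvDs_mem l hp1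
    obtain ⟨kb, hb, hkb⟩ := pvDs_mem l (List.mem_of_mem_tail hp2)
    exact pvCnt_append l c ha hb hkb.le
  · obtain ⟨ka, ha, hka⟩ := pvDs_mem l (List.getLast_mem hnil)
    simp only [List.map_cons, List.map_nil]
    rw [pvCnt_append l c ha rfl (le_refl _)]

def pvStep (st : List Int × Int × Bool) (ch : Char) : List Int × Int × Bool :=
  let (results, run, seen_delim) := st
  if ch = '.' ∨ ch = '?' then
    ((if seen_delim ∧ run ≠ 0 then results ++ [run] else results), 0, true)
  else if ch = '#' then
    (results, run + 1, seen_delim)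
  else
    (results, run, seen_delim)

lemma pvInv (l : List Char) :
    l.foldl pvStep ([], 0, false) =
      (pvA l,
       (if h : pvDs l = [] then (PySem.List.count l '#' : Int)
        else pvCnt l ((pvDs l).getLast h) (l.length : Int)),
       !(pvDs l).isEmpty) := by
  induction l using List.reverseRecOn with
  | nil => rfl
  | append_singleton l c ih =>
    rw [List.foldl_append, ih, List.foldl_cons, List.foldl_nil]
    have hds := pvDs_append l c
    by_cases hc : c = '.' ∨ c = '?'
    · rw [if_pos hc] at hds
      simp only [pvStep, if_pos hc]
      rw [hds]
      have hne : ¬(pvDs l ++ [(l.length : Int)] = []) := by simp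
      have hlast : (pvDs l ++ [(l.length : Int)]).getLast hne = (l.length : Int) := by simp
      rw [dif_neg hne]
      refine Prod.ext ?_ (Prod.ext ?_ ?_)
      · -- results component
        by_cases hnil : pvDs l = []
        · simp [pvA, hds, hnil]
        · rw [dif_neg hnil] at *
          rw [pvA_append_delim l c hc hnil]
          have hseen : (!(pvDs l).isEmpty) = true := by simp [hnil]
          rw [hseen]
          by_cases hz : pvCnt l ((pvDs l).getLast hnil) (l.length : Int) = 0 <;> simp [hz]
      · -- run component
        show (0 : Int) = _
        rw [hlast]
        unfold pvCnt
        have h1 : ((l.length : Int) + 1) = ((l.length + 1 : Nat) : Int) := by omega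
        have h2 : (((l ++ [c]).length : Nat) : Int) = ((l.length + 1 : Nat) : Int) := by simp
        rw [h1, h2, PySem.List.slice_natCast]
        simp
      · simp
    · rw [if_neg hc, List.append_nil] at hds
      simp only [pvStep, if_neg hc]
      have hfirst : pvA (l ++ [c]) = pvA l := pvA_append_keep l c hc
      have hsecond : (if h : pvDs (l ++ [c]) = [] then (PySem.List.count (l ++ [c]) '#' : Int)
          else pvCnt (l ++ [c]) ((pvDs (l ++ [c])).getLast h) ((l ++ [c]).length : Int)) =
          (if h : pvDs l = [] then (PySem.List.count l '#' : Int)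
            else pvCnt l ((pvDs l).getLast h) (l.length : Int)) + (if c = '#' then 1 else 0) := by
        by_cases hnil : pvDs l = []
        · rw [dif_pos (by rw [hds]; exact hnil), dif_pos hnil]
          rw [PySem.List.count_eq, PySem.List.count_eq, List.count_append]
          by_cases hc2 : c = '#' <;> simp [hc2]
        · rw [dif_neg (by rw [hds]; exact hnil), dif_neg hnil]
          have hgl : (pvDs (l ++ [c])).getLast (by rw [hds]; exact hnil) = (pvDs l).getLast hnil := by
            congr 1
          obtain ⟨ka, ha, hka⟩ := pvDs_mem l (List.getLast_mem hnil)
          rw [hgl, ha]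
          exact pvCnt_append_last l c hka
      by_cases hc2 : c = '#'
      · rw [if_pos hc2]
        refine Prod.ext ?_ (Prod.ext ?_ ?_)
        · exact hfirst.symm
        · show _ = _
          rw [hsecond, if_pos hc2]
        · show (!(pvDs l).isEmpty) = !(pvDs (l ++ [c])).isEmpty
          rw [hds]
      · rw [if_neg hc2]
        refine Prod.ext ?_ (Prod.ext ?_ ?_)
        · exact hfirst.symm
        · show _ = _
          rw [hsecond, if_neg hc2, add_zero]
        · show (!(pvDs l).isEmpty) = !(pvDs (l ++ [c])).isEmpty
          rw [hds]

-- ===== VERDICT (by name: the statement is the Claim_ definition above) =====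
theorem count_hashes_between_dots_spec : Claim_equal_count_hashes_between_dots := by
  intro s _
  unfold Spec_count_hashes_between_dots count_hashes_between_dots count_hashes_between_dots_alt
  have hB : s.toList.foldl
    (fun (st : List Int × Int × Bool) ch =>
      let (results, run, seen_delim) := st
      if ch = '.' ∨ ch = '?' then
        ((if seen_delim ∧ run ≠ 0 then results ++ [run] else results), 0, true)
      else if ch = '#' then
        (results, run + 1, seen_delim)
      else
        (results, run, seen_delim))
    ([], 0, false) = s.toList.foldl pvStep ([], 0, false) := rfl
  rw [hB, pvInv]
  have h2 := pvA_eq s.toList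
  unfold pvDs at h2
  exact h2
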